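-- pv_equiv track=rewrite | github.com/Saad030303/Translation_Pipeline_i18n | i18n_seed_pipeline/i18n_seed/sql_extractor.py | _split_values_groups
-- ===== SOURCE A (Python) =====
-- from typing import Dict, List, Tuple, Any, Optional
--
-- def _split_values_groups(values_segment: str) -> List[str]:
--     out = []; depth = 0; start = None; q = None; i = 0
--     while i < len(values_segment):
--         c = values_segment[i]
--         if q:
--             if c == q:
--                 q = None
--             elif c == "'" and q == "'" and i + 1 < len(values_segment) and values_segment[i + 1] == "'":
--                 i += 1
--             i += 1; continue
--         if c in ("'", '"'):
--             q = c; i += 1; continue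
--         if c == "(":
--             if depth == 0: start = i
--             depth += 1
--         elif c == ")":
--             depth -= 1
--             if depth == 0 and start is not None:
--                 out.append(values_segment[start:i + 1]); start = None
--         i += 1
--     return out
-- ===== SOURCE B (Python) =====
-- from typing import List
--
-- def _split_values_groups(values_segment: str) -> List[str]:
--     # Pass 1: mask[i] is True iff character i belongs to a quoted literal
--     # (the opening quote, its body, and the closing quote).
--     n = len(values_segment)
--     mask = [False] * n
--     q = None
--     for i, c in enumerate(values_segment):
--         if q is not None:
--             mask[i] = True
--             if c == q:
--                 q = None
--         elif c == "'" or c == '"':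
--             mask[i] = True
--             q = c
--     # Pass 2: depth scan over the unmasked characters only.
--     out = []
--     depth = 0
--     start = 0
--     for i, c in enumerate(values_segment):
--         if mask[i]:
--             continue
--         if c == "(":
--             if depth == 0:
--                 start = i
--             depth += 1
--         elif c == ")":
--             depth -= 1
--             if depth == 0:
--                 out.append(values_segment[start:i + 1])
--     return out
-- ===== Notes on version B (the rewrite author's own statement) =====
-- stated objective: alternative
-- what changed: Replaces A's single interleaved index/while scan (quote state, depth, optional start and appends all updated in one loop with continue-style control flow) by two separate passes: a first pass builds a boolean mask of quoted-literal characters, and a second pass does a plain depth scan over the unmasked characters, slicing groups from the original string.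
import Mathlib
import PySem

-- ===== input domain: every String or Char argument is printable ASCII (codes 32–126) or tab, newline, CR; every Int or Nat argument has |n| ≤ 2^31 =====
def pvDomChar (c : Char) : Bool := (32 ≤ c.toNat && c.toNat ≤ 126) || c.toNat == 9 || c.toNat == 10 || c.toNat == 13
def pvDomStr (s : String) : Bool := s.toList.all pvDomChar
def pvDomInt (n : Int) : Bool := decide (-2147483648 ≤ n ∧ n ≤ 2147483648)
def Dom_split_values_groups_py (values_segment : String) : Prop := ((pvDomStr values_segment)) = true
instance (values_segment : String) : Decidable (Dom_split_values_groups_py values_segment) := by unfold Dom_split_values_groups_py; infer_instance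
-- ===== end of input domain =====

-- B replaces A's single interleaved index scan by two passes — a quoted-literal
-- mask, then a plain depth scan over unmasked characters — same cost (alternative).

-- ===== PORT A =====
-- One interleaved while-loop over indices: quote state q, paren depth, optional
-- group start, output list — a literal transliteration of A.
-- (A's `elif` doubled-quote branch is kept verbatim; its guard requires c = q
-- inside the branch taken only when c ≠ q, as in the Python source.)
def aLoop (full : String) : List Char → Int → Int → Option Int → Option Char → List String → List String
  | [], _, _, _, _, out => out
  | c :: rest, i, depth, start, q, out =>
    match q with
    | some qc =>
      if c = qc then
        aLoop full rest (i + 1) depth start none out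
      else if c = '\'' ∧ qc = '\'' ∧ rest.head? = some '\'' then
        aLoop full (rest.drop 1) (i + 2) depth start (some qc) out
      else
        aLoop full rest (i + 1) depth start (some qc) out
    | none =>
      if c = '\'' ∨ c = '"' then
        aLoop full rest (i + 1) depth start (some c) out
      else if c = '(' then
        aLoop full rest (i + 1) (depth + 1) (if depth = 0 then some i else start) none out
      else if c = ')' then
        aLoop full rest (i + 1) (depth - 1)
          (if depth - 1 = 0 ∧ start.isSome then none else start) none
          (if depth - 1 = 0 ∧ start.isSome then
             out ++ [PySem.Str.slice full (some (start.getD 0)) (some (i + 1))]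
           else out)
      else
        aLoop full rest (i + 1) depth start none out
  termination_by cs _ _ _ _ _ => cs.length
  decreasing_by all_goals simp; try omega

def split_values_groups_py (values_segment : String) : List String :=
  aLoop values_segment values_segment.toList 0 0 none none []

-- ===== PORT B =====
-- Pass 1 of B: the quoted-literal mask.
def bMask : List Char → Option Char → List Bool
  | [], _ => []
  | c :: rest, some qc => true :: bMask rest (if c = qc then none else some qc)
  | c :: rest, none =>
    if c = '\'' ∨ c = '"' then true :: bMask rest (some c)
    else false :: bMask rest none

-- Pass 2 of B: depth scan over (char, mask) pairs.
def bLoop (full : String) : List (Char × Bool) → Int → Int → Int → List String → List String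
  | [], _, _, _, out => out
  | (c, m) :: rest, i, depth, start, out =>
    if m then bLoop full rest (i + 1) depth start out
    else if c = '(' then
      bLoop full rest (i + 1) (depth + 1) (if depth = 0 then i else start) out
    else if c = ')' then
      bLoop full rest (i + 1) (depth - 1) start
        (if depth - 1 = 0 then
           out ++ [PySem.Str.slice full (some start) (some (i + 1))]
         else out)
    else bLoop full rest (i + 1) depth start out

def split_values_groups_py_alt (values_segment : String) : List String :=
  bLoop values_segment (values_segment.toList.zip (bMask values_segment.toList none)) 0 0 0 []

-- ===== PRECONDITION & SPEC =====
def Spec_split_values_groups_py (values_segment : String) (out : List String) : Prop := out = split_values_groups_py_alt values_segment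
instance (values_segment : String) (out : List String) : Decidable (Spec_split_values_groups_py values_segment out) := by unfold Spec_split_values_groups_py; infer_instance

-- ===== CLAIM (what is proved, stated in full; the proofs are below) =====
def Claim_equal_split_values_groups_py : Prop := ∀ (values_segment : String), Dom_split_values_groups_py values_segment → Spec_split_values_groups_py values_segment (split_values_groups_py values_segment)


-- ===== LEMMAS AND PROOFS =====

-- Main invariant: A's interleaved loop equals B's second pass run over the mask
-- that B's first pass produces from the same quote state, provided A's optional
-- group start is `some startB` exactly when depth ≥ 1 and `none` when depth ≤ 0.
theorem loop_eq (full : String) : ∀ (cs : List Char) (i depth : Int)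
    (startA : Option Int) (startB : Int) (q : Option Char) (out : List String),
    (1 ≤ depth → startA = some startB) → (depth ≤ 0 → startA = none) →
    aLoop full cs i depth startA q out
      = bLoop full (cs.zip (bMask cs q)) i depth startB out := by
  intro cs
  induction cs with
  | nil => intro i depth startA startB q out _ _; simp [aLoop, bMask, bLoop]
  | cons c rest ih =>
    intro i depth startA startB q out h1 h2
    match q with
    | some qc =>
      by_cases hc : c = qc
      · simp only [aLoop, bMask, bLoop, if_pos hc, List.zip_cons_cons]
        exact ih (i + 1) depth startA startB none out h1 h2
      · have hdead : ¬ (c = '\'' ∧ qc = '\'' ∧ rest.head? = some '\'') := by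
          rintro ⟨ha, hb, -⟩; exact hc (ha.trans hb.symm)
        simp only [aLoop, bMask, bLoop, if_neg hc, if_neg hdead, List.zip_cons_cons]
        exact ih (i + 1) depth startA startB (some qc) out h1 h2
    | none =>
      by_cases hq : c = '\'' ∨ c = '"'
      · simp only [aLoop, bMask, bLoop, if_pos hq, List.zip_cons_cons]
        exact ih (i + 1) depth startA startB (some c) out h1 h2
      · by_cases hp : c = '('
        · simp only [aLoop, bMask, bLoop, if_neg hq, if_pos hp,
            List.zip_cons_cons, if_neg (by decide : ¬ (false = true))]
          refine ih (i + 1) (depth + 1) _ _ none out ?_ ?_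
          · intro hge
            by_cases hd : depth = 0
            · simp [hd]
            · simp [hd, h1 (by omega)]
          · intro hle
            have hd : ¬ depth = 0 := by omega
            simp [hd, h2 (by omega)]
        · by_cases hr : c = ')'
          · simp only [aLoop, bMask, bLoop, if_neg hq, if_neg hp, if_pos hr,
              List.zip_cons_cons, if_neg (by decide : ¬ (false = true))]
            by_cases hd : depth - 1 = 0
            · have hs : startA = some startB := h1 (by omega)
              simp only [hd, hs, Option.isSome_some, and_true, Option.getD_some, ite_true]
              exact ih (i + 1) 0 none startB none _ (by intro h; omega) (fun _ => rfl)
            · have hcond : ¬ (depth - 1 = 0 ∧ startA.isSome = true) := by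
                rintro ⟨h, -⟩; exact hd h
              simp only [if_neg hd, if_neg hcond]
              refine ih (i + 1) (depth - 1) startA startB none out ?_ ?_
              · intro h; exact h1 (by omega)
              · intro h
                by_cases hone : depth = 1
                · exact absurd hone (by omega)
                · exact h2 (by omega)
          · simp only [aLoop, bMask, bLoop, if_neg hq, if_neg hp, if_neg hr,
              List.zip_cons_cons, if_neg (by decide : ¬ (false = true))]
            exact ih (i + 1) depth startA startB none out h1 h2

-- ===== VERDICT (by name: the statement is the Claim_ definition above) =====
theorem split_values_groups_py_spec : Claim_equal_split_values_groups_py := by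
  intro values_segment _
  unfold Spec_split_values_groups_py split_values_groups_py split_values_groups_py_alt
  exact loop_eq values_segment values_segment.toList 0 0 none 0 none []
    (by intro h; omega) (fun _ => rfl)
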